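-- pv_equiv track=rewrite | github.com/TecMF/embedding_prompts | BM25/modulos_bm25/processa_bm25.py | __adicionar_n_vizinhos
-- ===== SOURCE A (Python) =====
-- from typing import Callable, Iterable, List, Tuple
--
-- def __adicionar_n_vizinhos(lista_indices: List[int], n: int = 0) -> List[int]:
--     """
--     Adiciona, para cada resultado do BM25, os seus n vizinhos. Supondo um texto dividido por
--     frases, se o BM25 selecionou a frase de índice 14, com esta função com n=1, seria retornado o texto com
--     as frases índice 12, 13 e 14. Pressupõe que o conjunto de textos enviado está ordenado.
--
--     Args:
--         lista_indices (List[int]): lista com os índices do resultado do BM25.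
--         n (int): quantidade de vizinhos a serem considerados ao redor dos índices em lista_indices.
--
--     Returns:
--         List[int]: lista com os índices de lista_indices, além dos índices vizinhos.
--     """
--     if n == 0:
--         return lista_indices
--
--     lista_indices_res = []
--     for i in lista_indices:
--         lista_indices_res.extend(range(max(0, i - n), i + n + 1))
--
--     # Removendo os duplicados preservando a ordem
--     lista_indices_res = sorted(set(lista_indices_res))
--
--     return lista_indices_res
-- ===== SOURCE B (Python) =====
-- from typing import List
--
-- def __adicionar_n_vizinhos(lista_indices: List[int], n: int = 0) -> List[int]:
--     """Sweep over the sorted distinct indices, emitting each merged interval once."""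
--     if n == 0:
--         return lista_indices
--
--     out = []
--     start = 0  # next index not yet emitted (all expanded indices are >= 0)
--     for i in sorted(set(lista_indices)):
--         lo = max(start, i - n)
--         hi = i + n
--         out.extend(range(lo, hi + 1))
--         start = max(start, hi + 1)
--     return out
-- ===== Notes on version B (the rewrite author's own statement) =====
-- stated objective: faster
-- what changed: Instead of materialising every neighbour of every index and then sorting+deduplicating the expanded list, B sorts the distinct input indices once and sweeps them with a cursor, emitting each merged interval's indices exactly once.
import Mathlib
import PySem

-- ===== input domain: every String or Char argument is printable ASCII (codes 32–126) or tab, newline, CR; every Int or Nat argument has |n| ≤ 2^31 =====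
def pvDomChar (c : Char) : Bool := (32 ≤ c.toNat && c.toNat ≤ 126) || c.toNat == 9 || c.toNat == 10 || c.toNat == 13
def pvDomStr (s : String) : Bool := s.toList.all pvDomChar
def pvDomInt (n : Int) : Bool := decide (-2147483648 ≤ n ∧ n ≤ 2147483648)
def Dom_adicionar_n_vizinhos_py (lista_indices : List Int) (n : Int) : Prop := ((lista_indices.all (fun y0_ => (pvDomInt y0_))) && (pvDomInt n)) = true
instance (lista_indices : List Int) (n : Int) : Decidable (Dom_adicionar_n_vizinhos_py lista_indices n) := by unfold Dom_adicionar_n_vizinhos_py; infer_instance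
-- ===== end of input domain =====

-- B replaces "expand every index's neighbourhood, then sorted(set(...))" by a single
-- cursor sweep over the sorted distinct indices that emits each merged interval once (faster).

-- ===== PORT A =====
def adicionar_n_vizinhos_py (lista_indices : List Int) (n : Int) : List Int :=
  if n = 0 then lista_indices
  else
    let lista_indices_res : List Int :=
      lista_indices.foldl
        (fun acc i => acc ++ PySem.List.pyRange (max 0 (i - n)) (i + n + 1) 1) []
    PySem.List.sorted (PySem.Set.ofList lista_indices_res) (fun x => x) false

-- ===== PORT B =====
def adicionar_n_vizinhos_py_alt (lista_indices : List Int) (n : Int) : List Int :=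
  if n = 0 then lista_indices
  else
    (((PySem.List.sorted (PySem.Set.ofList lista_indices) (fun x => x) false).foldl
      (fun (st : List Int × Int) i =>
        (st.1 ++ PySem.List.pyRange (max st.2 (i - n)) (i + n + 1) 1, max st.2 (i + n + 1)))
      ([], 0))).1

-- ===== PRECONDITION & SPEC =====
def Spec_adicionar_n_vizinhos_py (lista_indices : List Int) (n : Int) (out : List Int) : Prop := out = adicionar_n_vizinhos_py_alt lista_indices n
instance (lista_indices : List Int) (n : Int) (out : List Int) : Decidable (Spec_adicionar_n_vizinhos_py lista_indices n out) := by unfold Spec_adicionar_n_vizinhos_py; infer_instance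

-- ===== CLAIM (what is proved, stated in full; the proofs are below) =====
def Claim_equal_adicionar_n_vizinhos_py : Prop := ∀ (lista_indices : List Int) (n : Int), Dom_adicionar_n_vizinhos_py lista_indices n → Spec_adicionar_n_vizinhos_py lista_indices n (adicionar_n_vizinhos_py lista_indices n)

-- ===== LEMMAS AND PROOFS =====

-- The A-side expansion, as a membership statement.
lemma memA (lista : List Int) (n : Int) (x : Int) :
    x ∈ lista.foldl
        (fun acc i => acc ++ PySem.List.pyRange (max 0 (i - n)) (i + n + 1) 1) [] ↔
      ∃ i ∈ lista, max 0 (i - n) ≤ x ∧ x < i + n + 1 := by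
  rw [PySem.List.foldl_append_eq_flatMap]
  simp [List.mem_flatMap, PySem.List.mem_pyRange_one]

-- Invariant of B's sweep: the accumulated output stays strictly sorted and its
-- membership is "already emitted, or ≥ cursor and inside some remaining interval".
lemma sweep_inv (n : Int) (s : List Int) :
    ∀ (out : List Int) (start : Int),
      s.Pairwise (· < ·) → out.Pairwise (· < ·) → (∀ x ∈ out, x < start) →
      (s.foldl
        (fun (st : List Int × Int) i =>
          (st.1 ++ PySem.List.pyRange (max st.2 (i - n)) (i + n + 1) 1, max st.2 (i + n + 1)))
        (out, start)).1.Pairwise (· < ·) ∧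
      ∀ x, (x ∈ (s.foldl
        (fun (st : List Int × Int) i =>
          (st.1 ++ PySem.List.pyRange (max st.2 (i - n)) (i + n + 1) 1, max st.2 (i + n + 1)))
        (out, start)).1 ↔
        x ∈ out ∨ (start ≤ x ∧ ∃ i ∈ s, i - n ≤ x ∧ x ≤ i + n)) := by
  induction s with
  | nil => intro out start _ hout _; simpa using hout
  | cons i s' ih =>
    intro out start hs hout hlt
    have hs' : s'.Pairwise (· < ·) := hs.of_cons
    have hi : ∀ j ∈ s', i < j := fun j hj => List.rel_of_pairwise_cons hs hj
    have hout' : (out ++ PySem.List.pyRange (max start (i - n)) (i + n + 1) 1).Pairwise (· < ·) := by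
      rw [List.pairwise_append]
      refine ⟨hout, PySem.List.pairwise_lt_pyRange_one _ _, ?_⟩
      intro a ha b hb
      have := hlt a ha
      have := (PySem.List.mem_pyRange_one.mp hb).1
      omega
    have hlt' : ∀ x ∈ out ++ PySem.List.pyRange (max start (i - n)) (i + n + 1) 1,
        x < max start (i + n + 1) := by
      intro x hx
      rcases List.mem_append.mp hx with h | h
      · have := hlt x h; omega
      · have := (PySem.List.mem_pyRange_one.mp h).2; omega
    obtain ⟨hp, hm⟩ := ih (out ++ PySem.List.pyRange (max start (i - n)) (i + n + 1) 1)
      (max start (i + n + 1)) hs' hout' hlt'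
    refine ⟨by simpa using hp, ?_⟩
    intro x
    rw [List.foldl_cons]
    constructor
    · intro hx
      rcases (hm x).mp hx with h | ⟨hge, j, hj, hb⟩
      · rcases List.mem_append.mp h with h | h
        · exact Or.inl h
        · have := PySem.List.mem_pyRange_one.mp h
          exact Or.inr ⟨by omega, i, List.mem_cons_self .., by omega⟩
      · exact Or.inr ⟨by omega, j, List.mem_cons_of_mem _ hj, hb⟩
    · intro hx
      rcases hx with h | ⟨hge, j, hj, hb⟩
      · exact (hm x).mpr (Or.inl (List.mem_append_left _ h))
      · rcases List.mem_cons.mp hj with rfl | hj'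
        · exact (hm x).mpr (Or.inl (List.mem_append_right _
            (PySem.List.mem_pyRange_one.mpr (by omega))))
        · by_cases hc : max start (i + n + 1) ≤ x
          · exact (hm x).mpr (Or.inr ⟨hc, j, hj', hb⟩)
          · -- x < i+n+1 and x is inside j's interval with j > i, hence inside i's interval
            have hji : i < j := hi j hj'
            exact (hm x).mpr (Or.inl (List.mem_append_right _
              (PySem.List.mem_pyRange_one.mpr (by omega))))

-- Strictly sorted lists with the same members are equal.
lemma eq_of_pairwise_lt_of_mem_iff {l₁ l₂ : List Int}
    (h₁ : l₁.Pairwise (· < ·)) (h₂ : l₂.Pairwise (· < ·))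
    (hm : ∀ x, x ∈ l₁ ↔ x ∈ l₂) : l₁ = l₂ := by
  have hn₁ : l₁.Nodup := h₁.imp ne_of_lt
  have hn₂ : l₂.Nodup := h₂.imp ne_of_lt
  have hperm : l₁.Perm l₂ := (List.perm_ext_iff_of_nodup hn₁ hn₂).mpr hm
  calc l₁ = PySem.List.sorted l₂ (fun x => x) false :=
        (PySem.List.sorted_eq_of_perm_of_pairwise_lt _ _ _ hperm h₁).symm
    _ = l₂ := PySem.List.sorted_eq_self_of_pairwise _ _ (h₂.imp le_of_lt)

-- ===== VERDICT (by name: the statement is the Claim_ definition above) =====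
theorem adicionar_n_vizinhos_py_spec : Claim_equal_adicionar_n_vizinhos_py := by
  intro lista n _
  unfold Spec_adicionar_n_vizinhos_py adicionar_n_vizinhos_py adicionar_n_vizinhos_py_alt
  by_cases h0 : n = 0
  · simp [h0]
  · simp only [h0, if_false]
    set s := PySem.List.sorted (PySem.Set.ofList lista) (fun x => x) false with hsdef
    have hsp : s.Pairwise (· < ·) := PySem.List.sorted_ofList_pairwise_lt lista
    obtain ⟨hbp, hbm⟩ := sweep_inv n s [] 0 hsp List.Pairwise.nil (by simp)
    apply eq_of_pairwise_lt_of_mem_iff (PySem.List.sorted_ofList_pairwise_lt _) hbp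
    intro x
    rw [PySem.List.mem_sorted, PySem.Set.mem_ofList, memA, hbm]
    have hms : ∀ i, i ∈ s ↔ i ∈ lista := by
      intro i; rw [hsdef, PySem.List.mem_sorted, PySem.Set.mem_ofList]
    constructor
    · rintro ⟨i, hi, hb⟩
      exact Or.inr ⟨by omega, i, (hms i).mpr hi, by omega⟩
    · rintro (h | ⟨hge, i, hi, hb⟩)
      · simp at h
      · exact ⟨i, (hms i).mp hi, by omega⟩
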